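-- pv_equiv track=rewrite | github.com/raeez/chiral-bar-cobar | compute/lib/cy_borcherds_lift_engine.py | bkm_real_root_count
-- ===== SOURCE A (Python) =====
-- def bkm_real_root_count(n_max: int = 10) -> int:
--     r"""Count positive real roots (D = -1) up to n_max.
--
--     Real roots have 4nm - l^2 = -1 with (n,l,m) > 0.
--     Solutions: l^2 = 4nm + 1, so l^2 - 1 = 4nm.
--
--     For m = 0: 4*n*0 = l^2 - 1, need l^2 = 1, so l = pm 1.
--       With m=0, n>0: (n, +1, 0) and (n, -1, 0) for each n >= 1.
--       With m=0, n=0: l < 0, so (0, -1, 0).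
--     For m >= 1: 4nm = l^2 - 1 = (l-1)(l+1).
--     """
--     count = 0
--     for m in range(0, n_max + 1):
--         for n in range(0, n_max + 1):
--             for l in range(-2 * n_max, 2 * n_max + 1):
--                 if 4 * n * m - l * l != -1:
--                     continue
--                 if m > 0 or (m == 0 and n > 0) or (m == 0 and n == 0 and l < 0):
--                     count += 1
--     return count
-- ===== SOURCE B (Python) =====
-- def bkm_real_root_count(n_max: int = 10) -> int:
--     # Hash-index of perfect squares removes A's inner scan over l:
--     # l^2 = 4nm+1 has solutions l = +-r iff 4nm+1 is a square r^2 with r <= 2*n_max.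
--     squares = {l * l for l in range(2 * n_max + 1)}
--     count = 0
--     for m in range(n_max + 1):
--         for n in range(n_max + 1):
--             if 4 * n * m + 1 in squares:
--                 count += 1 if (m == 0 and n == 0) else 2
--     return count
-- ===== Notes on version B (the rewrite author's own statement) =====
-- stated objective: faster
-- what changed: A scans all l in [-2*n_max, 2*n_max] inside a triple loop; B builds a set of perfect squares once and replaces the inner l-scan by an O(1) membership test of 4nm+1, counting l=+-sqrt directly.
import Mathlib
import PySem

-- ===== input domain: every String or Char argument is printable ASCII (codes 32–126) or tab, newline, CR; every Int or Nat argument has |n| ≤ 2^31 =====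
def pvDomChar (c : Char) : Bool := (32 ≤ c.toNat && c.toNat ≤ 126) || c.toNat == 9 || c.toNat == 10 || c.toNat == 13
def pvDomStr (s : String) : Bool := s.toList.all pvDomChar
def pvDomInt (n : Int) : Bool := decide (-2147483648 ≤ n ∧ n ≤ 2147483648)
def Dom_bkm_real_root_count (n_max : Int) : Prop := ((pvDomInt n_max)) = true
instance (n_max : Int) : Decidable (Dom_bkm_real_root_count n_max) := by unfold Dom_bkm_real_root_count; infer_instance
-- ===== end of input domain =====

-- B replaces A's inner scan over all l with a set of perfect squares built once; objective: faster (asymptotic).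

-- ===== PORT A =====
def bkm_real_root_count (n_max : Int) : Int :=
  (PySem.List.pyRange 0 (n_max + 1) 1).foldl (fun count m =>
    (PySem.List.pyRange 0 (n_max + 1) 1).foldl (fun count n =>
      (PySem.List.pyRange (-2 * n_max) (2 * n_max + 1) 1).foldl (fun count l =>
        if 4 * n * m - l * l ≠ -1 then count
        else if m > 0 ∨ (m = 0 ∧ n > 0) ∨ (m = 0 ∧ n = 0 ∧ l < 0) then count + 1
        else count) count) count) 0

-- ===== PORT B =====
def bkm_real_root_count_alt (n_max : Int) : Int :=
  let squares : PySem.Set Int :=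
    PySem.Set.ofList ((PySem.List.pyRange 0 (2 * n_max + 1) 1).map (fun l => l * l))
  (PySem.List.pyRange 0 (n_max + 1) 1).foldl (fun count m =>
    (PySem.List.pyRange 0 (n_max + 1) 1).foldl (fun count n =>
      if (4 * n * m + 1) ∈ squares then
        count + (if m = 0 ∧ n = 0 then 1 else 2)
      else count) count) 0

-- ===== PRECONDITION & SPEC =====
def Spec_bkm_real_root_count (n_max : Int) (out : Int) : Prop := out = bkm_real_root_count_alt n_max
instance (n_max : Int) (out : Int) : Decidable (Spec_bkm_real_root_count n_max out) := by unfold Spec_bkm_real_root_count; infer_instance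

-- ===== CLAIM (what is proved, stated in full; the proofs are below) =====
def Claim_equal_bkm_real_root_count : Prop := ∀ (n_max : Int), Dom_bkm_real_root_count n_max → Spec_bkm_real_root_count n_max (bkm_real_root_count n_max)

-- ===== LEMMAS AND PROOFS =====

-- per-pair contribution of A's inner l-loop
def cntA (N m n : Int) : Nat :=
  (PySem.List.pyRange (-2 * N) (2 * N + 1) 1).countP
    (fun l => decide (4 * n * m - l * l = -1 ∧
      (m > 0 ∨ (m = 0 ∧ n > 0) ∨ (m = 0 ∧ n = 0 ∧ l < 0))))

-- per-pair contribution of B's membership test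
def cntB (N m n : Int) : Int :=
  if (4 * n * m + 1) ∈ PySem.Set.ofList ((PySem.List.pyRange 0 (2 * N + 1) 1).map (fun l => l * l))
  then (if m = 0 ∧ n = 0 then 1 else 2) else 0

lemma innerA_eq (N m n : Int) (c : Int) :
    (PySem.List.pyRange (-2 * N) (2 * N + 1) 1).foldl (fun count l =>
        if 4 * n * m - l * l ≠ -1 then count
        else if m > 0 ∨ (m = 0 ∧ n > 0) ∨ (m = 0 ∧ n = 0 ∧ l < 0) then count + 1
        else count) c = c + (cntA N m n : Int) := by
  rw [PySem.List.foldl_congr_mem _ _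
      (fun count l => if 4 * n * m - l * l = -1 ∧
          (m > 0 ∨ (m = 0 ∧ n > 0) ∨ (m = 0 ∧ n = 0 ∧ l < 0)) then count + 1 else count)
      c (fun acc x _ => by dsimp only; split_ifs <;> tauto)]
  exact PySem.List.foldl_ite_add_one _ _ _

lemma countP_pair {l : List Int} (hnd : l.Nodup) {a b : Int} (hab : a ≠ b)
    (ha : a ∈ l) (hb : b ∈ l) :
    l.countP (fun x => decide (x = a ∨ x = b)) = 2 := by
  rw [List.countP_eq_length_filter]
  have hperm : List.Perm (l.filter (fun x => decide (x = a ∨ x = b))) [a, b] := by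
    rw [List.perm_ext_iff_of_nodup (hnd.filter _) (by simp [hab])]
    intro x
    simp only [List.mem_filter, decide_eq_true_eq, List.mem_cons, List.not_mem_nil, or_false]
    constructor
    · rintro ⟨_, h⟩; exact h
    · rintro (rfl | rfl)
      · exact ⟨ha, Or.inl rfl⟩
      · exact ⟨hb, Or.inr rfl⟩
  simpa using hperm.length_eq

lemma countP_single {l : List Int} (hnd : l.Nodup) {a : Int} (ha : a ∈ l) :
    l.countP (fun x => decide (x = a)) = 1 := by
  rw [List.countP_eq_length_filter]
  have hperm : List.Perm (l.filter (fun x => decide (x = a))) [a] := by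
    rw [List.perm_ext_iff_of_nodup (hnd.filter _) (List.nodup_singleton a)]
    intro x
    simp only [List.mem_filter, decide_eq_true_eq, List.mem_singleton]
    constructor
    · rintro ⟨_, h⟩; exact h
    · rintro rfl; exact ⟨ha, rfl⟩
  simpa using hperm.length_eq

-- the heart: for 0 ≤ m,n ≤ N the l-scan count equals the square-set test
lemma cnt_eq (N m n : Int) (hm0 : 0 ≤ m) (hmN : m ≤ N) (hn0 : 0 ≤ n) (hnN : n ≤ N) :
    (cntA N m n : Int) = cntB N m n := by
  unfold cntA cntB
  have hnm : 0 ≤ n * m := mul_nonneg hn0 hm0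
  by_cases hmem : (4 * n * m + 1) ∈
      PySem.Set.ofList ((PySem.List.pyRange 0 (2 * N + 1) 1).map (fun l => l * l))
  · obtain ⟨r, hrmem, hr2⟩ :=
      List.mem_map.mp ((PySem.Set.mem_ofList _ _).mp hmem)
    obtain ⟨hr0, hrN⟩ := PySem.List.mem_pyRange_one.mp hrmem
    have hr1 : 1 ≤ r := by nlinarith
    rw [if_pos hmem]
    by_cases h00 : m = 0 ∧ n = 0
    · obtain ⟨rfl, rfl⟩ := h00
      have hre : r = 1 := by nlinarith
      subst hre
      rw [if_pos ⟨rfl, rfl⟩]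
      rw [List.countP_congr (q := fun x => decide (x = -1)) ?_]
      · rw [countP_single (PySem.List.nodup_pyRange_one _ _)
          (PySem.List.mem_pyRange_one.mpr (by omega))]
        rfl
      · intro x _
        simp only [decide_eq_true_eq]
        constructor
        · rintro ⟨hsq, _⟩
          have hx : x * x = 1 * 1 := by linarith
          rcases mul_self_eq_mul_self_iff.mp hx with rfl | h <;> omega
        · rintro rfl
          exact ⟨by norm_num, by norm_num⟩
    · rw [if_neg h00]
      rw [List.countP_congr (q := fun x => decide (x = r ∨ x = -r)) ?_]
      · rw [countP_pair (PySem.List.nodup_pyRange_one _ _) (by omega)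
          (PySem.List.mem_pyRange_one.mpr (by omega))
          (PySem.List.mem_pyRange_one.mpr (by omega))]
        rfl
      · intro x _
        simp only [decide_eq_true_eq]
        constructor
        · rintro ⟨hsq, _⟩
          have hx : x * x = r * r := by linarith
          exact mul_self_eq_mul_self_iff.mp hx
        · have hcond : m > 0 ∨ (m = 0 ∧ n > 0) ∨ (m = 0 ∧ n = 0 ∧ x < 0) := by
            rcases eq_or_lt_of_le hm0 with h | h
            · rcases eq_or_lt_of_le hn0 with h' | h'
              · exact absurd ⟨h.symm, h'.symm⟩ h00
              · exact Or.inr (Or.inl ⟨h.symm, h'⟩)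
            · exact Or.inl h
          rintro (rfl | rfl)
          · exact ⟨by linarith, hcond⟩
          · refine ⟨?_, hcond⟩
            have : (-r) * (-r) = r * r := by ring
            linarith
  · rw [if_neg hmem]
    have hz : (PySem.List.pyRange (-2 * N) (2 * N + 1) 1).countP
        (fun l => decide (4 * n * m - l * l = -1 ∧
          (m > 0 ∨ (m = 0 ∧ n > 0) ∨ (m = 0 ∧ n = 0 ∧ l < 0)))) = 0 := by
      rw [List.countP_eq_zero]
      intro x hx
      obtain ⟨hx1, hx2⟩ := PySem.List.mem_pyRange_one.mp hx
      simp only [decide_eq_true_eq, not_and]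
      intro hsq _
      refine absurd ?_ hmem
      rw [PySem.Set.mem_ofList, List.mem_map]
      refine ⟨if 0 ≤ x then x else -x, ?_, ?_⟩
      · exact PySem.List.mem_pyRange_one.mpr (by split_ifs <;> omega)
      · split_ifs with h
        · linarith
        · have : (-x) * (-x) = x * x := by ring
          linarith
    rw [hz]; rfl

lemma sumA (N : Int) :
    bkm_real_root_count N =
      ((PySem.List.pyRange 0 (N + 1) 1).map (fun m =>
        ((PySem.List.pyRange 0 (N + 1) 1).map (fun n => (cntA N m n : Int))).sum)).sum := by
  unfold bkm_real_root_count
  rw [PySem.List.foldl_congr_mem _ _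
      (fun count m => count +
        ((PySem.List.pyRange 0 (N + 1) 1).map (fun n => (cntA N m n : Int))).sum)
      0
      (fun acc m _ => by
        rw [PySem.List.foldl_congr_mem _ _
            (fun count n => count + (cntA N m n : Int)) acc
            (fun acc2 n _ => innerA_eq N m n acc2)]
        exact PySem.List.foldl_add _ _ _)]
  rw [PySem.List.foldl_add]
  simp

lemma sumB (N : Int) :
    bkm_real_root_count_alt N =
      ((PySem.List.pyRange 0 (N + 1) 1).map (fun m =>
        ((PySem.List.pyRange 0 (N + 1) 1).map (fun n => cntB N m n)).sum)).sum := by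
  show (PySem.List.pyRange 0 (N + 1) 1).foldl (fun count m =>
    (PySem.List.pyRange 0 (N + 1) 1).foldl (fun count n =>
      if (4 * n * m + 1) ∈ PySem.Set.ofList
          ((PySem.List.pyRange 0 (2 * N + 1) 1).map (fun l => l * l)) then
        count + (if m = 0 ∧ n = 0 then 1 else 2)
      else count) count) 0 = _
  rw [PySem.List.foldl_congr_mem _ _
      (fun count m => count +
        ((PySem.List.pyRange 0 (N + 1) 1).map (fun n => cntB N m n)).sum)
      0
      (fun acc m _ => by
        rw [PySem.List.foldl_congr_mem _ _
            (fun count n => count + cntB N m n) acc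
            (fun acc2 n _ => by dsimp only; unfold cntB; split_ifs <;> omega)]
        exact PySem.List.foldl_add _ _ _)]
  rw [PySem.List.foldl_add]
  simp

-- ===== VERDICT (by name: the statement is the Claim_ definition above) =====
theorem bkm_real_root_count_spec : Claim_equal_bkm_real_root_count := by
  intro N _
  unfold Spec_bkm_real_root_count
  rw [sumA, sumB]
  refine congrArg List.sum (List.map_congr_left fun m hm => ?_)
  refine congrArg List.sum (List.map_congr_left fun n hn => ?_)
  rw [PySem.List.mem_pyRange_one] at hm hn
  exact cnt_eq N m n hm.1 (by omega) hn.1 (by omega)
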